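-- pv_equiv track=rewrite | github.com/Noah-Gans/comunity_view_backend_v2 | search_api/search_engine.py | _score_by_fields
-- ===== SOURCE A (Python) =====
-- from typing import List, Dict, Any, Optional
--
-- def _score_by_fields(entry: Dict[str, Any], query_lower: str, query_words: List[str], field_filter: List[str]) -> int:
--     """Score entry based on specific fields only - ANY field can match"""
--     score = 0
--
--     # Check if ANY of the specified fields match (not all)
--     for field in field_filter:
--         field_lower = field.lower()
--         field_score = 0
--
--         if field_lower == "owner":
--             owner = entry.get("owner", "")
--             if owner and any(word in owner.lower() for word in query_words):
--                 field_score = 500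
--         elif field_lower == "pidn":
--             parcel_id = entry.get("pidn", "")
--             if parcel_id and query_lower in parcel_id.lower():
--                 field_score = 400
--         elif field_lower == "mailing_address":
--             address = entry.get("mailing_address", "")
--             if address and any(word in address.lower() for word in query_words):
--                 field_score = 300
--         elif field_lower == "physical_address":
--             address = entry.get("physical_address", "")
--             if address and any(word in address.lower() for word in query_words):
--                 field_score = 300
--         elif field_lower == "county":
--             county = entry.get("county", "")
--             if county and query_lower in county.lower():
--                 field_score = 200
--
--         # Use the highest score from any matching field
--         score = max(score, field_score)
--
--     return score
-- ===== SOURCE B (Python) =====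
-- # Inverted traversal: instead of scoring every requested field and folding a
-- # running max, walk the fixed field table in DESCENDING weight order and return
-- # the first weight whose field is both requested and matching (early return).
-- # Correct because A's result is the max of the matched weights, and the first
-- # match in a descending-weight scan IS that max.
--
-- _FIELDS_BY_WEIGHT = (
--     ("owner", 500, True),
--     ("pidn", 400, False),
--     ("mailing_address", 300, True),
--     ("physical_address", 300, True),
--     ("county", 200, False),
-- )
--
--
-- def _score_by_fields(entry, query_lower, query_words, field_filter):
--     wanted = {f.lower() for f in field_filter}
--     for name, weight, by_words in _FIELDS_BY_WEIGHT:
--         if name not in wanted: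
--             continue
--         text = entry.get(name, "")
--         if not text:
--             continue
--         low = text.lower()
--         if (any(w in low for w in query_words) if by_words else query_lower in low):
--             return weight
--     return 0
-- ===== Notes on version B (the rewrite author's own statement) =====
-- stated objective: alternative
-- what changed: Inverts the traversal: instead of scoring every requested field and threading a running max, B builds a set of the lowercased requested fields once and walks the fixed field table in descending weight order, returning the first weight whose field is requested and matches (early return replaces the max fold).
import Mathlib
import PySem

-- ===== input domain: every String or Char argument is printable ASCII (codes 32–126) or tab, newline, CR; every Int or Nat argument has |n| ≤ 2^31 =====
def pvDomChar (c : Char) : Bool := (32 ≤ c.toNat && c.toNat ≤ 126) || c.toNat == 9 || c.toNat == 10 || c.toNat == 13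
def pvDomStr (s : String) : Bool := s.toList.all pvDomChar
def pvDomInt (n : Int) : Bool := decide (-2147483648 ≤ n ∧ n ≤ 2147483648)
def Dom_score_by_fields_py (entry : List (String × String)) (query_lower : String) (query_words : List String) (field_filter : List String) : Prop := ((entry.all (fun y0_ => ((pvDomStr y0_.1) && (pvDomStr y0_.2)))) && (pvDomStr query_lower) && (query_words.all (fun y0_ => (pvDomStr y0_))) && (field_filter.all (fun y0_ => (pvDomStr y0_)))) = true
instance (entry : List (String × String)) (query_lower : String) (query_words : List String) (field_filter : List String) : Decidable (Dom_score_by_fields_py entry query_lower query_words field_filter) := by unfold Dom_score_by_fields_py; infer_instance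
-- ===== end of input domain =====

-- B inverts the traversal: it builds the set of lowercased requested fields once
-- and scans the fixed field table in descending weight order, returning the first
-- matching weight instead of folding a running max over field_filter
-- (objective: alternative; correct since the first hit of a descending scan is the max).

-- ===== PORT A =====
def score_by_fields_py (entry : List (String × String)) (query_lower : String) (query_words : List String) (field_filter : List String) : Int :=
  field_filter.foldl (fun score field =>
    let field_lower := PySem.Str.lower field
    let field_score : Int :=
      if field_lower == "owner" then
        let owner := (PySem.Dict.mk entry).getD "owner" ""
        if owner != "" && query_words.any (fun word => PySem.Str.isIn word (PySem.Str.lower owner)) then 500 else 0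
      else if field_lower == "pidn" then
        let parcel_id := (PySem.Dict.mk entry).getD "pidn" ""
        if parcel_id != "" && PySem.Str.isIn query_lower (PySem.Str.lower parcel_id) then 400 else 0
      else if field_lower == "mailing_address" then
        let address := (PySem.Dict.mk entry).getD "mailing_address" ""
        if address != "" && query_words.any (fun word => PySem.Str.isIn word (PySem.Str.lower address)) then 300 else 0
      else if field_lower == "physical_address" then
        let address := (PySem.Dict.mk entry).getD "physical_address" ""
        if address != "" && query_words.any (fun word => PySem.Str.isIn word (PySem.Str.lower address)) then 300 else 0
      else if field_lower == "county" then
        let county := (PySem.Dict.mk entry).getD "county" ""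
        if county != "" && PySem.Str.isIn query_lower (PySem.Str.lower county) then 200 else 0
      else 0
    max score field_score) 0

-- ===== PORT B =====
def pvTable : List (String × Int × Bool) :=
  [("owner", 500, true), ("pidn", 400, false), ("mailing_address", 300, true), ("physical_address", 300, true), ("county", 200, false)]

-- the for-loop over the table with early return, transcribed as structural recursion
def pvFirstHit (entry : List (String × String)) (query_lower : String) (query_words : List String) (wanted : PySem.Set String) : List (String × Int × Bool) → Int
  | [] => 0
  | (name, weight, by_words) :: rest =>
    if !(wanted.contains name) then pvFirstHit entry query_lower query_words wanted rest
    else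
      let text := (PySem.Dict.mk entry).getD name ""
      if text == "" then pvFirstHit entry query_lower query_words wanted rest
      else
        let low := PySem.Str.lower text
        if (if by_words then query_words.any (fun w => PySem.Str.isIn w low) else PySem.Str.isIn query_lower low)
        then weight
        else pvFirstHit entry query_lower query_words wanted rest

def score_by_fields_py_alt (entry : List (String × String)) (query_lower : String) (query_words : List String) (field_filter : List String) : Int :=
  let wanted := PySem.Set.ofList (field_filter.map PySem.Str.lower)
  pvFirstHit entry query_lower query_words wanted pvTable

-- ===== PRECONDITION & SPEC =====
def Spec_score_by_fields_py (entry : List (String × String)) (query_lower : String) (query_words : List String) (field_filter : List String) (out : Int) : Prop := out = score_by_fields_py_alt entry query_lower query_words field_filter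
instance (entry : List (String × String)) (query_lower : String) (query_words : List String) (field_filter : List String) (out : Int) : Decidable (Spec_score_by_fields_py entry query_lower query_words field_filter out) := by unfold Spec_score_by_fields_py; infer_instance

-- ===== CLAIM =====
def Claim_equal_score_by_fields_py : Prop := ∀ (entry : List (String × String)) (query_lower : String) (query_words : List String) (field_filter : List String), Dom_score_by_fields_py entry query_lower query_words field_filter → Spec_score_by_fields_py entry query_lower query_words field_filter (score_by_fields_py entry query_lower query_words field_filter)

-- ===== LEMMAS AND PROOFS =====

-- the match predicate of a single named field (proof helper)
def pvHitB (entry : List (String × String)) (ql : String) (qws : List String) (name : String) (bw : Bool) : Bool :=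
  let text := (PySem.Dict.mk entry).getD name ""
  text != "" && (if bw then qws.any (fun w => PySem.Str.isIn w (PySem.Str.lower text)) else PySem.Str.isIn ql (PySem.Str.lower text))

-- A's per-field score as a function of the lowered field name (proof helper)
def pvScoreF (entry : List (String × String)) (ql : String) (qws : List String) (name : String) : Int :=
  if name == "owner" then (if pvHitB entry ql qws "owner" true then 500 else 0)
  else if name == "pidn" then (if pvHitB entry ql qws "pidn" false then 400 else 0)
  else if name == "mailing_address" then (if pvHitB entry ql qws "mailing_address" true then 300 else 0)
  else if name == "physical_address" then (if pvHitB entry ql qws "physical_address" true then 300 else 0)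
  else if name == "county" then (if pvHitB entry ql qws "county" false then 200 else 0)
  else 0

lemma pvFirstHit_cons (entry : List (String × String)) (ql : String) (qws : List String) (wanted : PySem.Set String) (name : String) (weight : Int) (bw : Bool) (rest : List (String × Int × Bool)) :
    pvFirstHit entry ql qws wanted ((name, weight, bw) :: rest)
      = if (wanted.contains name && pvHitB entry ql qws name bw) = true then weight else pvFirstHit entry ql qws wanted rest := by
  simp only [pvFirstHit, pvHitB]
  by_cases hc : name ∈ wanted <;>
    by_cases ht : (PySem.Dict.mk entry).getD name "" = "" <;>
      simp [hc, ht]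

-- A as a fold of max over the mapped per-field scores
lemma pvA_eq_foldl (entry : List (String × String)) (ql : String) (qws : List String) (ff : List String) :
    score_by_fields_py entry ql qws ff
      = (ff.map (fun f => pvScoreF entry ql qws (PySem.Str.lower f))).foldl max 0 := by
  unfold score_by_fields_py
  rw [← List.foldl_map]
  apply List.foldl_ext
  intro s f _
  rfl

lemma pvFoldl_max_le (l : List Int) (s b : Int) (hs : s ≤ b) (h : ∀ x ∈ l, x ≤ b) : l.foldl max s ≤ b := by
  induction l generalizing s with
  | nil => exact hs
  | cons x t ih =>
    exact ih (max s x) (max_le hs (h x List.mem_cons_self)) (fun y hy => h y (List.mem_cons_of_mem _ hy))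

-- main: B computes the max A folds
lemma pv_main (entry : List (String × String)) (ql : String) (qws : List String) (ff : List String) :
    score_by_fields_py entry ql qws ff = score_by_fields_py_alt entry ql qws ff := by
  rw [pvA_eq_foldl]
  unfold score_by_fields_py_alt pvTable
  set wanted := PySem.Set.ofList (ff.map PySem.Str.lower) with hw
  rw [pvFirstHit_cons, pvFirstHit_cons, pvFirstHit_cons, pvFirstHit_cons, pvFirstHit_cons]
  simp only [pvFirstHit]
  have hmemw : ∀ n : String, wanted.contains n = true ↔ ∃ f ∈ ff, PySem.Str.lower f = n := by
    intro n
    rw [hw, PySem.Set.contains_iff, PySem.Set.mem_ofList, List.mem_map]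
  set c1 := wanted.contains "owner" && pvHitB entry ql qws "owner" true with hc1
  set c2 := wanted.contains "pidn" && pvHitB entry ql qws "pidn" false with hc2
  set c3 := wanted.contains "mailing_address" && pvHitB entry ql qws "mailing_address" true with hc3
  set c4 := wanted.contains "physical_address" && pvHitB entry ql qws "physical_address" true with hc4
  set c5 := wanted.contains "county" && pvHitB entry ql qws "county" false with hc5
  set R : Int := if c1 = true then 500 else if c2 = true then 400 else if c3 = true then 300 else if c4 = true then 300 else if c5 = true then 200 else 0 with hR
  have hR0 : 0 ≤ R := by rw [hR]; split_ifs <;> omega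
  -- upper bound: every per-field score is ≤ R
  have hub : ∀ f ∈ ff, pvScoreF entry ql qws (PySem.Str.lower f) ≤ R := by
    intro f hf
    unfold pvScoreF
    split_ifs with h1 h1' h2 h2' h3 h3' h4 h4' h5 h5'
    all_goals try exact hR0
    · -- lower f = "owner", hit
      have hc : wanted.contains "owner" = true := (hmemw "owner").2 ⟨f, hf, by simpa using h1⟩
      have : c1 = true := by rw [hc1, hc, h1']; rfl
      rw [hR, if_pos this]
    · have hc : wanted.contains "pidn" = true := (hmemw "pidn").2 ⟨f, hf, by simpa using h2⟩
      have : c2 = true := by rw [hc2, hc, h2']; rfl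
      rw [hR]; split_ifs <;> omega
    · have hc : wanted.contains "mailing_address" = true := (hmemw "mailing_address").2 ⟨f, hf, by simpa using h3⟩
      have : c3 = true := by rw [hc3, hc, h3']; rfl
      rw [hR]; split_ifs <;> omega
    · have hc : wanted.contains "physical_address" = true := (hmemw "physical_address").2 ⟨f, hf, by simpa using h4⟩
      have : c4 = true := by rw [hc4, hc, h4']; rfl
      rw [hR]; split_ifs <;> omega
    · have hc : wanted.contains "county" = true := (hmemw "county").2 ⟨f, hf, by simpa using h5⟩
      have : c5 = true := by rw [hc5, hc, h5']; rfl
      rw [hR]; split_ifs <;> omega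
  have hMle : (ff.map (fun f => pvScoreF entry ql qws (PySem.Str.lower f))).foldl max 0 ≤ R :=
    pvFoldl_max_le _ 0 R hR0 (by intro x hx; obtain ⟨f, hf, rfl⟩ := List.mem_map.mp hx; exact hub f hf)
  -- lower bound: R is one of the per-field scores (or 0)
  have key : ∀ (n : String) (w : Int) (bw : Bool), (wanted.contains n && pvHitB entry ql qws n bw) = true →
      pvScoreF entry ql qws n = (if pvHitB entry ql qws n bw = true then w else 0) →
      w ≤ (ff.map (fun f => pvScoreF entry ql qws (PySem.Str.lower f))).foldl max 0 := by
    intro n w bw hcb hsf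
    have hc := (Bool.and_eq_true _ _).mp hcb
    obtain ⟨f, hf, hlf⟩ := (hmemw n).1 hc.1
    have hval : pvScoreF entry ql qws (PySem.Str.lower f) = w := by
      rw [hlf, hsf, if_pos hc.2]
    have hmem : w ∈ ff.map (fun f => pvScoreF entry ql qws (PySem.Str.lower f)) :=
      List.mem_map.mpr ⟨f, hf, hval⟩
    exact (PySem.List.le_foldl_max _ 0).2 w hmem
  have hRle : R ≤ (ff.map (fun f => pvScoreF entry ql qws (PySem.Str.lower f))).foldl max 0 := by
    rw [hR]
    split_ifs with h1 h2 h3 h4 h5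
    · exact key "owner" 500 true h1 (by simp [pvScoreF])
    · exact key "pidn" 400 false h2 (by simp [pvScoreF])
    · exact key "mailing_address" 300 true h3 (by simp [pvScoreF])
    · exact key "physical_address" 300 true h4 (by simp [pvScoreF])
    · exact key "county" 200 false h5 (by simp [pvScoreF])
    · exact (PySem.List.le_foldl_max _ 0).1
  exact le_antisymm hMle hRle

-- ===== VERDICT =====
theorem score_by_fields_py_spec : Claim_equal_score_by_fields_py := by
  intro entry ql qws ff _
  unfold Spec_score_by_fields_py
  exact pv_main entry ql qws ff
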